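-- pv_equiv track=rewrite | github.com/Flopsey/Advent-of-Code-2022 | Day 25/puzzle.py | snafu2dec
-- ===== SOURCE A (Python) =====
-- def snafu2dec(snafu: str) -> int:
--     conversion_table = {
--         '=': -2,
--         '-': -1,
--         '0': 0,
--         '1': 1,
--         '2': 2,
--     }
--     return sum((5 ** exp) * conversion_table[digit] for exp, digit in enumerate(snafu[::-1]))
-- ===== SOURCE B (Python) =====
-- def snafu2dec(snafu: str) -> int:
--     conversion_table = {
--         '=': -2,
--         '-': -1,
--         '0': 0,
--         '1': 1,
--         '2': 2,
--     }
--     result = 0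
--     for digit in snafu:
--         result = result * 5 + conversion_table[digit]
--     return result
-- ===== Notes on version B (the rewrite author's own statement) =====
-- stated objective: idiomatic
-- what changed: Replaced the reversed, power-weighted enumerate-sum (computing 5**exp per digit) with a forward Horner accumulator loop (result = result*5 + table[digit]).
import Mathlib
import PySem

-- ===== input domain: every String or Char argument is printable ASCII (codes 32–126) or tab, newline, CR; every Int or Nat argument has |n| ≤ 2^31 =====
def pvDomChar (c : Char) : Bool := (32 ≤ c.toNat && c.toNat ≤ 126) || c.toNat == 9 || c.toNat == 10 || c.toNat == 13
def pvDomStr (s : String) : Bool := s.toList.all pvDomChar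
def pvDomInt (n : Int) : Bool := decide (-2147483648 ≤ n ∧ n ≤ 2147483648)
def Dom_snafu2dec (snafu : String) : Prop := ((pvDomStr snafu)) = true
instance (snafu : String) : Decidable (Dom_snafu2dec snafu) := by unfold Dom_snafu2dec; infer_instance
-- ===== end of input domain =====

-- B replaces A's reversed power-weighted sum (5**exp per digit) with a forward Horner
-- accumulator loop; objective: idiomatic.


-- ===== PORT A =====
-- the conversion_table dict lookup; the default 0 branch is unreachable under Pre_
-- (Python raises KeyError there, which Pre_snafu2dec excludes)
def snafuConv (c : Char) : Int :=
  match c with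
  | '=' => -2
  | '-' => -1
  | '0' => 0
  | '1' => 1
  | '2' => 2
  | _ => 0

def snafu2dec (snafu : String) : Int :=
  ((PySem.List.enumerate snafu.toList.reverse 0).map
    (fun p => (5 : Int) ^ p.1.toNat * snafuConv p.2)).sum

-- ===== PORT B =====
def snafu2dec_alt (snafu : String) : Int :=
  snafu.toList.foldl (fun result digit => result * 5 + snafuConv digit) 0

-- ===== PRECONDITION & SPEC =====
-- Pre_ excludes strings containing a character outside '=-012': there Python's dict
-- lookup raises KeyError in both A and B.
def Pre_snafu2dec (snafu : String) : Prop :=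
  snafu.toList.all (fun c => c ∈ ['=', '-', '0', '1', '2']) = true
instance (snafu : String) : Decidable (Pre_snafu2dec snafu) := by unfold Pre_snafu2dec; infer_instance
def pvWitness_snafu2dec : String := "2=-01"

def Spec_snafu2dec (snafu : String) (out : Int) : Prop := out = snafu2dec_alt snafu
instance (snafu : String) (out : Int) : Decidable (Spec_snafu2dec snafu out) := by unfold Spec_snafu2dec; infer_instance

-- ===== CLAIM (what is proved, stated in full; the proofs are below) =====
def Claim_equal_snafu2dec : Prop := ∀ (snafu : String), Dom_snafu2dec snafu → Pre_snafu2dec snafu → Spec_snafu2dec snafu (snafu2dec snafu)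

-- ===== LEMMAS AND PROOFS =====

-- A's value on a list of digits
def snafuSum (l : List Char) : Int :=
  ((PySem.List.enumerate l.reverse 0).map
    (fun p => (5 : Int) ^ p.1.toNat * snafuConv p.2)).sum

theorem snafuSum_cons (c : Char) (l : List Char) :
    snafuSum (c :: l) = snafuSum l + (5 : Int) ^ l.length * snafuConv c := by
  simp [snafuSum, PySem.List.enumerate_append, PySem.List.enumerate_cons]

theorem horner_eq (l : List Char) : ∀ (acc : Int),
    l.foldl (fun result digit => result * 5 + snafuConv digit) acc
      = acc * (5 : Int) ^ l.length + snafuSum l := by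
  induction l with
  | nil => intro acc; simp [snafuSum]
  | cons c t ih =>
      intro acc
      simp only [List.foldl_cons, ih, snafuSum_cons, List.length_cons]
      ring

-- ===== VERDICT (by name: the statement is the Claim_ definition above) =====
theorem snafu2dec_spec : Claim_equal_snafu2dec := by
  intro snafu _ _
  show snafu2dec snafu = snafu2dec_alt snafu
  have h := horner_eq snafu.toList 0
  simp only [zero_mul, zero_add] at h
  simp [snafu2dec, snafu2dec_alt, h, snafuSum]
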